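-- pv_equiv track=rewrite | github.com/arupsky/affective_pupil | Evaluation/Helper.py | extendZeroZone
-- ===== SOURCE A (Python) =====
-- def extendZeroZone(pplList, width):
-- 	# for dt in data:
-- 	# pplList = dt['pupilList']
-- 	isZeroZone = pplList[0] == 0
--
-- 	for i in range(len(pplList)):
-- 		if not isZeroZone and pplList[i] == 0:
-- 			isZeroZone = True
-- 			for j in range(i-width,i):
-- 				if j >= 0:
-- 					pplList[j] = 0
-- 		# if isZeroZone and pplList[i] != 0:
-- 		# 	isZeroZone = False
-- 		# 	for j in range(i + 1, i + width + 1):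
-- 		# 		if j < len(pplList):
-- 		# 			pplList[j] = 0
-- 		# 	i = i + width
-- 	# dt['pupilList'] = pplList
-- 	return pplList
-- ===== SOURCE B (Python) =====
-- def extendZeroZone(pplList, width):
-- 	# Single forward streaming pass with a lag buffer: each element is held back
-- 	# in `buf` (at most `width` recent elements) until it is known to be safe;
-- 	# when the first zero arrives the held-back elements are flushed as zeros.
-- 	# Mutates pplList in place like A (via pplList[:] = out) and returns it.
-- 	if pplList[0] == 0:
-- 		return pplList
-- 	out = []
-- 	buf = []
-- 	seen = False
-- 	for x in pplList:
-- 		if seen: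
-- 			out.append(x)
-- 		elif x == 0:
-- 			seen = True
-- 			out.extend([0] * len(buf))
-- 			buf = []
-- 			out.append(0)
-- 		else:
-- 			buf.append(x)
-- 			if len(buf) > width:
-- 				out.append(buf.pop(0))
-- 	if not seen:
-- 		out.extend(buf)
-- 	pplList[:] = out
-- 	return pplList
-- ===== Notes on version B (the rewrite author's own statement) =====
-- stated objective: alternative
-- what changed: Replaces A's indexed scan with retroactive backward zeroing (inner j-loop writing back into the array) by a single forward streaming pass with a lag buffer of at most width held-back elements, which are flushed as zeros when the first zero arrives; no backward writes and no index arithmetic.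
import Mathlib
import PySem

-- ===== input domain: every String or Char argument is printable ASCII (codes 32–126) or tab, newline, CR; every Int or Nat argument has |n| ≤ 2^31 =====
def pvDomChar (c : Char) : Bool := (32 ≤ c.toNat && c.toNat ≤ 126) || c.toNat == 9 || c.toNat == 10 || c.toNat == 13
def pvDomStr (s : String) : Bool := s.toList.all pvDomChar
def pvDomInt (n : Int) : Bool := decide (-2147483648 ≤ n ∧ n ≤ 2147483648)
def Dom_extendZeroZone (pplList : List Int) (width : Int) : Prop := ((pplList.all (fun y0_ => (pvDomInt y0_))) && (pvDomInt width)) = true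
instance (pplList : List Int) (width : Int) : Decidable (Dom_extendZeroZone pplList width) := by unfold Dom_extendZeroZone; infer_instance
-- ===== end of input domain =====

-- B replaces A's indexed scan with backward retroactive zeroing by a single forward
-- streaming pass with a lag buffer; both Pythons mutate pplList in place identically,
-- the theorems are about the returned value.

-- ===== PORT A =====
-- inner loop: for j in range(i-width, i): if j >= 0: pplList[j] = 0
def azFill (i width : Int) (xs : List Int) : List Int :=
  (PySem.List.pyRange (i - width) i 1).foldl
    (fun ys j => if 0 ≤ j then PySem.List.pySetD ys j 0 else ys) xs

-- one iteration of the outer for-loop, state = (pplList, isZeroZone)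
def azStep (width : Int) (st : List Int × Bool) (i : Int) : List Int × Bool :=
  if st.2 = false ∧ PySem.List.pyGetD st.1 i 0 = 0 then (azFill i width st.1, true) else st

def extendZeroZone (pplList : List Int) (width : Int) : List Int :=
  match PySem.List.pyGet? pplList 0 with
  | none => []      -- Python raises IndexError here; excluded by Pre_
  | some h0 =>
    ((PySem.List.pyRange 0 (PySem.List.len pplList) 1).foldl
        (azStep width) (pplList, h0 == 0)).1

-- ===== PORT B =====
-- one iteration of B's streaming loop, state = (out, buf, seen)
def bStep (width : Int) (st : List Int × List Int × Bool) (x : Int) : List Int × List Int × Bool :=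
  if st.2.2 then (st.1 ++ [x], st.2.1, true)
  else if x = 0 then (st.1 ++ List.replicate st.2.1.length 0 ++ [0], [], true)
  else
    let buf := st.2.1 ++ [x]
    if (buf.length : Int) > width then
      match buf with                       -- buf.pop(0); buf is nonempty here
      | [] => (st.1, [], false)            -- unreachable
      | b :: bs => (st.1 ++ [b], bs, false)
    else (st.1, buf, false)

def extendZeroZone_alt (pplList : List Int) (width : Int) : List Int :=
  match pplList with
  | [] => []        -- Python raises IndexError here; excluded by Pre_
  | h :: _ =>
    if h = 0 then pplList
    else
      let st := pplList.foldl (bStep width) ([], [], false)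
      if st.2.2 then st.1 else st.1 ++ st.2.1

-- ===== PRECONDITION & SPEC =====
-- A (and B) raise IndexError on the empty list
def Pre_extendZeroZone (pplList : List Int) (width : Int) : Prop := pplList ≠ []
instance (pplList : List Int) (width : Int) : Decidable (Pre_extendZeroZone pplList width) := by
  unfold Pre_extendZeroZone; infer_instance

def pvWitness_extendZeroZone : List Int × Int := ([3, 1, 0, 5], 1)

def Spec_extendZeroZone (pplList : List Int) (width : Int) (out : List Int) : Prop := out = extendZeroZone_alt pplList width
instance (pplList : List Int) (width : Int) (out : List Int) : Decidable (Spec_extendZeroZone pplList width out) := by unfold Spec_extendZeroZone; infer_instance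

-- ===== CLAIM (what is proved, stated in full; the proofs are below) =====
def Claim_equal_extendZeroZone : Prop := ∀ (pplList : List Int) (width : Int), Dom_extendZeroZone pplList width → Pre_extendZeroZone pplList width → Spec_extendZeroZone pplList width (extendZeroZone pplList width)

-- ===== LEMMAS AND PROOFS =====

-- ----- A-side: characterise the scan -----

-- once the flag is true the loop never changes the state again
theorem azStep_absorb (width : Int) (l : List Int) (xs : List Int) :
    l.foldl (azStep width) (xs, true) = (xs, true) := by
  induction l generalizing xs with
  | nil => rfl
  | cons a l ih => simp [List.foldl, azStep, ih]

theorem azFill_getElem? (i width : Int) (xs : List Int) (k : Nat) :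
    (azFill i width xs)[k]? =
      if (k : Int) ∈ PySem.List.pyRange (i - width) i 1 ∧ k < xs.length
      then some 0 else xs[k]? := by
  unfold azFill
  generalize PySem.List.pyRange (i - width) i 1 = l
  induction l generalizing xs with
  | nil => simp
  | cons a l ih =>
    simp only [List.foldl]
    by_cases ha : 0 ≤ a
    · rw [if_pos ha, PySem.List.pySetD_of_nonneg _ _ ha, ih]
      simp only [List.length_set]
      by_cases hk : (k : Int) ∈ l ∧ k < xs.length
      · rw [if_pos hk, if_pos ⟨List.mem_cons_of_mem _ hk.1, hk.2⟩]
      · rw [if_neg hk]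
        by_cases hak : a = (k : Int) ∧ k < xs.length
        · have hat : a.toNat = k := by omega
          rw [hat, List.getElem?_set_self hak.2,
              if_pos ⟨by rw [← hak.1]; exact List.mem_cons_self, hak.2⟩]
        · rw [if_neg (by
              rintro ⟨hm, hklen⟩
              rcases List.mem_cons.mp hm with h1 | h2
              · exact hak ⟨h1.symm, hklen⟩
              · exact hk ⟨h2, hklen⟩)]
          by_cases hklen : k < xs.length
          · exact List.getElem?_set_ne (by omega)
          · rw [List.getElem?_eq_none (by simp only [List.length_set]; omega),
                List.getElem?_eq_none (by omega)]
    · rw [if_neg ha, ih]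
      by_cases hk : (k : Int) ∈ l ∧ k < xs.length
      · rw [if_pos hk, if_pos ⟨List.mem_cons_of_mem _ hk.1, hk.2⟩]
      · rw [if_neg hk, if_neg]
        rintro ⟨hm, hklen⟩
        rcases List.mem_cons.mp hm with h1 | h2
        · omega
        · exact hk ⟨h2, hklen⟩

-- the fill A performs at the first zero equals the canonical take/replicate/drop form
theorem azFill_eq_slice (xs : List Int) (i : Nat) (width : Int) (hi : i < xs.length) :
    azFill (i : Int) width xs =
      xs.take (max 0 ((i : Int) - width)).toNat
        ++ List.replicate (((i : Int) - max 0 ((i : Int) - width)).toNat) 0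
        ++ xs.drop (max (max 0 ((i : Int) - width)).toNat i) := by
  set lo : Int := max 0 ((i : Int) - width) with hlo
  have hlo0 : 0 ≤ lo := le_max_left _ _
  apply List.ext_getElem?
  intro k
  rw [azFill_getElem?]
  simp only [PySem.List.mem_pyRange_one]
  by_cases hklen : k < xs.length
  · by_cases hz : (i : Int) - width ≤ (k : Int) ∧ (k : Int) < (i : Int)
    · rw [if_pos ⟨hz, hklen⟩]
      rw [List.getElem?_append_left
            (by simp only [List.length_append, List.length_take, List.length_replicate]; omega),
          List.getElem?_append_right (by simp only [List.length_take]; omega),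
          List.getElem?_replicate]
      rw [if_pos (by simp only [List.length_take]; omega)]
    · rw [if_neg (by tauto)]
      by_cases hlt : k < lo.toNat
      · rw [List.getElem?_append_left
              (by simp only [List.length_append, List.length_take, List.length_replicate]; omega),
            List.getElem?_append_left (by simp only [List.length_take]; omega),
            List.getElem?_take_of_lt hlt]
      · rw [List.getElem?_append_right
              (by simp only [List.length_append, List.length_take, List.length_replicate]; omega),
            List.getElem?_drop]
        congr 1
        simp only [List.length_append, List.length_take, List.length_replicate]
        omega
  · rw [if_neg (by tauto)]
    rw [List.getElem?_eq_none (by omega), List.getElem?_eq_none]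
    simp only [List.length_append, List.length_take, List.length_replicate, List.length_drop]
    omega

-- scanning forward from k over a zero-free stretch leaves the state unchanged
theorem azScan_nofind (width : Int) (xs : List Int) (n : Nat) (hn : n = xs.length) :
    ∀ (d k : Nat), k + d = n →
    (∀ m : Nat, k ≤ m → m < n → xs[m]? ≠ some 0) →
    (PySem.List.pyRange (k : Int) (n : Int) 1).foldl (azStep width) (xs, false) = (xs, false) := by
  intro d
  induction d with
  | zero =>
    intro k hk _
    rw [PySem.List.pyRange_one_eq_nil (by omega)]
    rfl
  | succ d ih =>
    intro k hk hnz
    rw [PySem.List.pyRange_one_cons (by omega)]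
    simp only [List.foldl]
    have h1 : azStep width (xs, false) (k : Int) = (xs, false) := by
      unfold azStep
      rw [if_neg]
      rintro ⟨-, h0⟩
      have hkl : k < xs.length := by omega
      simp only [PySem.List.pyGetD_natCast, List.getD_eq_getElem?_getD,
        List.getElem?_eq_getElem hkl, Option.getD_some] at h0
      exact hnz k le_rfl (by omega) (by rw [List.getElem?_eq_getElem hkl, h0])
    rw [h1]
    have : ((k : Int) + 1) = ((k + 1 : Nat) : Int) := by push_cast; ring
    rw [this]
    exact ih (k + 1) (by omega) (fun m hm h2 => hnz m (by omega) h2)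

-- hitting the first zero at i triggers exactly one fill and sets the flag
theorem azScan_find (width : Int) (xs : List Int) (n : Nat) (hn : n = xs.length)
    (i : Nat) (hi : i < n) (hz : xs[i]? = some 0) :
    ∀ (d k : Nat), k + d = n → k ≤ i →
    (∀ m : Nat, k ≤ m → m < i → xs[m]? ≠ some 0) →
    (PySem.List.pyRange (k : Int) (n : Int) 1).foldl (azStep width) (xs, false)
      = (azFill (i : Int) width xs, true) := by
  intro d
  induction d with
  | zero => intro k hk hki _; omega
  | succ d ih =>
    intro k hk hki hnz
    rw [PySem.List.pyRange_one_cons (by omega)]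
    simp only [List.foldl]
    by_cases hke : k = i
    · subst hke
      have h1 : azStep width (xs, false) (k : Int) = (azFill (k : Int) width xs, true) := by
        unfold azStep
        rw [if_pos]
        refine ⟨rfl, ?_⟩
        simp only [PySem.List.pyGetD_natCast, List.getD_eq_getElem?_getD, hz, Option.getD_some]
      rw [h1, azStep_absorb]
    · have h1 : azStep width (xs, false) (k : Int) = (xs, false) := by
        unfold azStep
        rw [if_neg]
        rintro ⟨-, h0⟩
        have hkl : k < xs.length := by omega
        simp only [PySem.List.pyGetD_natCast, List.getD_eq_getElem?_getD,
          List.getElem?_eq_getElem hkl, Option.getD_some] at h0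
        exact hnz k le_rfl (by omega) (by rw [List.getElem?_eq_getElem hkl, h0])
      rw [h1]
      have : ((k : Int) + 1) = ((k + 1 : Nat) : Int) := by push_cast; ring
      rw [this]
      exact ih (k + 1) (by omega) (by omega) (fun m hm h2 => hnz m (by omega) h2)

-- ----- B-side: characterise the streaming fold -----

-- once seen is true the fold just appends the remaining elements
theorem bScan_seen (width : Int) (l : List Int) (out buf : List Int) :
    l.foldl (bStep width) (out, buf, true) = (out ++ l, buf, true) := by
  induction l generalizing out with
  | nil => simp
  | cons x l ih => simp [List.foldl, bStep, ih]

-- over a zero-free stretch the fold conserves out ++ buf and clamps buf to width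
theorem bScan_nozero (width : Int) (l : List Int) :
    ∀ (out buf : List Int), (∀ x ∈ l, x ≠ 0) → buf.length ≤ width.toNat →
    ∃ out' buf',
      l.foldl (bStep width) (out, buf, false) = (out', buf', false) ∧
      out' ++ buf' = out ++ buf ++ l ∧
      buf'.length = min (buf.length + l.length) width.toNat := by
  induction l with
  | nil =>
    intro out buf _ hb
    refine ⟨out, buf, rfl, by simp, ?_⟩
    simp only [List.length_nil, Nat.add_zero]
    omega
  | cons x l ih =>
    intro out buf hnz hb
    have hx : x ≠ 0 := hnz x List.mem_cons_self
    simp only [List.foldl]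
    have hstep : bStep width (out, buf, false) x =
        (if ((buf.length + 1 : Nat) : Int) > width then
          (match buf ++ [x] with
            | [] => (out, ([] : List Int), false)
            | b :: bs => (out ++ [b], bs, false))
        else (out, buf ++ [x], false)) := by
      simp [bStep, hx]
    by_cases hpop : ((buf.length + 1 : Nat) : Int) > width
    · rw [hstep, if_pos hpop]
      obtain ⟨b, bs, hbe⟩ : ∃ b bs, buf ++ [x] = b :: bs := by
        cases hbx : buf ++ [x] with
        | nil => exact absurd hbx (by simp)
        | cons b bs => exact ⟨b, bs, rfl⟩
      rw [hbe]
      have hbs : bs.length = buf.length := by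
        have := congrArg List.length hbe; simp at this; omega
      obtain ⟨out', buf', he, hcat, hlen⟩ :=
        ih (out ++ [b]) bs (fun y hy => hnz y (List.mem_cons_of_mem _ hy)) (by omega)
      refine ⟨out', buf', he, ?_, ?_⟩
      · rw [hcat]
        calc out ++ [b] ++ bs ++ l = out ++ (b :: bs) ++ l := by simp
          _ = out ++ (buf ++ [x]) ++ l := by rw [hbe]
          _ = out ++ buf ++ x :: l := by simp
      · have hge : width.toNat ≤ buf.length := by omega
        rw [hlen, hbs]
        simp only [List.length_cons]
        omega
    · rw [hstep, if_neg hpop]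
      have hble : (buf ++ [x]).length ≤ width.toNat := by simp; omega
      obtain ⟨out', buf', he, hcat, hlen⟩ :=
        ih out (buf ++ [x]) (fun y hy => hnz y (List.mem_cons_of_mem _ hy)) hble
      refine ⟨out', buf', he, by rw [hcat]; simp, ?_⟩
      rw [hlen]
      simp only [List.length_append, List.length_cons, List.length_nil]
      omega

-- the canonical value of B on p ++ 0 :: rest with p zero-free
theorem bFold_split (width : Int) (p rest : List Int) (hp : ∀ x ∈ p, x ≠ 0) :
    ∃ st, (p ++ 0 :: rest).foldl (bStep width) ([], [], false) = st ∧ st.2.2 = true ∧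
      st.1 = p.take (p.length - min p.length width.toNat)
           ++ List.replicate (min p.length width.toNat) 0 ++ [0] ++ rest := by
  obtain ⟨out', buf', he, hcat, hlen⟩ := bScan_nozero width p [] [] hp (by simp)
  simp only [List.nil_append, List.length_nil, Nat.zero_add] at hcat hlen
  have hout : out' = p.take (p.length - min p.length width.toNat) := by
    have h1 : out' = (out' ++ buf').take out'.length := by simp
    have h2 : out'.length = p.length - min p.length width.toNat := by
      have := congrArg List.length hcat; simp at this; omega
    rw [h1, hcat, h2]
  have hbuf0 : List.replicate buf'.length (0 : Int) =
      List.replicate (min p.length width.toNat) 0 := by rw [hlen]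
  rw [List.foldl_append, he]
  have hstep : bStep width (out', buf', false) 0
      = (out' ++ List.replicate buf'.length 0 ++ [0], [], true) := by
    simp [bStep]
  rw [List.foldl_cons, hstep, bScan_seen]
  refine ⟨_, rfl, rfl, ?_⟩
  rw [hout, hbuf0]

-- ===== VERDICT helper: the main equivalence =====
theorem extendZeroZone_eq (pplList : List Int) (width : Int) (hpre : pplList ≠ []) :
    extendZeroZone pplList width = extendZeroZone_alt pplList width := by
  obtain ⟨h, t, rfl⟩ : ∃ h t, pplList = h :: t := by
    cases pplList with
    | nil => exact absurd rfl hpre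
    | cons h t => exact ⟨h, t, rfl⟩
  unfold extendZeroZone extendZeroZone_alt
  rw [PySem.List.pyGet?_zero_cons h t]
  simp only [PySem.List.len_eq]
  by_cases hh : h = 0
  · rw [if_pos hh, show (h == 0) = true by simp [hh], azStep_absorb]
  · rw [if_neg hh, show (h == 0) = false by simp [hh]]
    set xs := h :: t with hxs
    -- split xs at the first zero via takeWhile/dropWhile
    set p := xs.takeWhile (fun x => x != 0) with hpdef
    have hpnz : ∀ x ∈ p, x ≠ 0 := by
      intro x hx
      have := List.mem_takeWhile_imp hx
      simpa using this
    have hsplit : p ++ xs.dropWhile (fun x => x != 0) = xs := List.takeWhile_append_dropWhile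
    have hcast : ((0 : Nat) : Int) = (0 : Int) := rfl
    cases hdrop : xs.dropWhile (fun x => x != 0) with
    | nil =>
      -- no zero anywhere
      have hall : ∀ x ∈ xs, x ≠ 0 := by
        have hpx : p = xs := by rw [← hsplit, hdrop, List.append_nil]
        rw [← hpx]; exact hpnz
      rw [← hcast, azScan_nofind width xs xs.length rfl xs.length 0 (by omega)
            (fun m _ hm hsome => hall 0 (List.mem_of_getElem? hsome) rfl)]
      obtain ⟨out', buf', he, hcat, _⟩ := bScan_nozero width xs [] [] hall (by simp)
      simp only [he, if_neg (by simp : ¬ (false = true))]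
      simp only [List.nil_append] at hcat
      exact hcat.symm
    | cons z rest =>
      have hz0 : z = 0 := by
        have := List.head?_dropWhile_not (fun x => x != 0) xs
        rw [hdrop] at this
        simpa using this
      subst hz0
      have hxsplit : xs = p ++ 0 :: rest := by rw [← hsplit, hdrop]
      set i := p.length with hidef
      have hilen : i < xs.length := by rw [hxsplit]; simp; omega
      have hxi : xs[i]? = some 0 := by
        rw [hxsplit, List.getElem?_append_right (by omega)]
        simp [hidef]
      have hbefore : ∀ m : Nat, (0:Nat) ≤ m → m < i → xs[m]? ≠ some 0 := by
        intro m _ hm hsome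
        have hmp : xs[m]? = p[m]? := by
          rw [hxsplit, List.getElem?_append_left (by omega)]
        rw [hmp] at hsome
        exact hpnz 0 (List.mem_of_getElem? hsome) rfl
      -- A's side
      rw [← hcast, azScan_find width xs xs.length rfl i hilen hxi xs.length 0 (by omega)
            (by omega) hbefore]
      -- B's side
      obtain ⟨st, hst, hseen, hval⟩ := bFold_split width p rest hpnz
      rw [← hxsplit] at hst
      simp only [hst, hseen, if_true, hval]
      -- both equal the canonical form
      set m := min i width.toNat with hm
      have hA := azFill_eq_slice xs i width hilen
      rw [hA]
      set lo : Int := max 0 ((i : Int) - width) with hlo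
      have hlo1 : lo.toNat = if 0 ≤ width then i - m else (i + (-width).toNat) := by
        split <;> omega
      by_cases hw : 0 ≤ width
      · have hmlo : lo.toNat = i - m := by omega
        have hmax : max lo.toNat i = i := by omega
        have himlo : ((i:Int) - lo).toNat = m := by omega
        rw [hmax, himlo, hmlo]
        have htake : xs.take (i - m) = p.take (i - m) := by
          rw [hxsplit, List.take_append_of_le_length (by omega)]
        have hdropi : xs.drop i = 0 :: rest := by
          rw [hxsplit, hidef, List.drop_left]
        rw [htake, hdropi]
        simp [hidef, List.append_assoc]
      · -- negative width: A fills nothing, B buffers nothing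
        have hm0 : m = 0 := by omega
        have hfill : azFill (i : Int) width xs = xs := by
          unfold azFill
          rw [PySem.List.pyRange_one_eq_nil (by omega)]
          rfl
        rw [← hA, hfill, hm0]
        simp [hxsplit]

-- ===== VERDICT (by name: the statement is the Claim_ definition above) =====
theorem extendZeroZone_spec : Claim_equal_extendZeroZone := by
  intro pplList width _ hpre
  unfold Spec_extendZeroZone
  exact extendZeroZone_eq pplList width hpre
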